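-- pv_equiv track=rewrite | github.com/bloodyblad3/pythonEducation | seminar3/task1.py | sum_not_even
-- ===== SOURCE A (Python) =====
-- def sum_not_even(list):
--     sum = 0
--     for i in range(len(list)):
--         if i % 2 != 0:
--             sum += list[i]
--         else:
--             continue
--     return sum
-- ===== SOURCE B (Python) =====
-- def sum_not_even(list):
--     return sum(list[1::2])
-- ===== Notes on version B (the rewrite author's own statement) =====
-- stated objective: idiomatic
-- what changed: Replaced the explicit index loop with a modulo parity test by a stride-2 slice starting at index 1 folded with the built-in sum, so there is no per-index branch at all.
import Mathlib
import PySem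

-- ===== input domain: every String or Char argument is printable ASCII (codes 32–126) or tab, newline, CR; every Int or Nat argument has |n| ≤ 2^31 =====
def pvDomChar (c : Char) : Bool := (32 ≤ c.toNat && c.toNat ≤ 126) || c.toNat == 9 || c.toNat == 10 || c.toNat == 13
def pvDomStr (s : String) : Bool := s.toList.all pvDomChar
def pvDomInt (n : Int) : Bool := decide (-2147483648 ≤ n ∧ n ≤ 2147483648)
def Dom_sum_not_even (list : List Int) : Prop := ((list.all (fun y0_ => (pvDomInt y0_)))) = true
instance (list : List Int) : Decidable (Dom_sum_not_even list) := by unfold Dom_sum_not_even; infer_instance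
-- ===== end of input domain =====

-- B replaces A's index loop with parity test by a stride-2 slice summed with the built-in sum (idiomatic).

-- ===== PORT A =====
-- for i in range(len(list)): if i % 2 != 0: sum += list[i]
def sum_not_even (list : List Int) : Int :=
  (PySem.List.pyRange 0 (list.length : Int) 1).foldl
    (fun s i => if PySem.Int.mod i 2 ≠ 0 then s + PySem.List.pyGetD list i 0 else s) 0

-- ===== PORT B =====
-- return sum(list[1::2])
def sum_not_even_alt (list : List Int) : Int :=
  ((PySem.List.slice? list (some 1) none 2).getD []).sum

-- ===== PRECONDITION & SPEC =====
def Spec_sum_not_even (list : List Int) (out : Int) : Prop := out = sum_not_even_alt list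
instance (list : List Int) (out : Int) : Decidable (Spec_sum_not_even list out) := by unfold Spec_sum_not_even; infer_instance

-- ===== CLAIM (what is proved, stated in full; the proofs are below) =====
def Claim_equal_sum_not_even : Prop := ∀ (list : List Int), Dom_sum_not_even list → Spec_sum_not_even list (sum_not_even list)

-- ===== LEMMAS AND PROOFS =====

/-- The odd-indexed elements of a list. -/
def pvOdds : List Int → List Int
  | _ :: y :: zs => y :: pvOdds zs
  | _ => []

lemma pvRange_two_step (n : Nat) : List.range (n + 2)
    = 0 :: 1 :: (List.range n).map (fun k => k + 2) := by
  rw [List.range_succ_eq_map, List.range_succ_eq_map, List.map_cons, List.map_map]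
  refine congrArg _ (congrArg _ ?_)
  apply List.map_congr_left
  intro k _
  simp [Function.comp, Nat.succ_eq_add_one]

lemma pvOdds_key : ∀ (xs : List Int) (s : Int),
    (List.range xs.length).foldl
      (fun s k => if (k % 2 : Nat) ≠ 0 then s + xs.getD k 0 else s) s
      = s + (pvOdds xs).sum
  | [], s => by simp [pvOdds]
  | [x], s => by simp [pvOdds, List.range_succ]
  | x :: y :: zs, s => by
    have hr := pvRange_two_step zs.length
    simp only [List.length_cons]
    rw [show zs.length + 1 + 1 = zs.length + 2 by omega, hr]
    rw [List.foldl_cons, List.foldl_cons, List.foldl_map]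
    norm_num
    rw [List.foldl_ext _ (fun s k => if (k % 2 : Nat) ≠ 0 then s + zs.getD k 0 else s)
      _ (fun a b _ => by simp)]
    rw [pvOdds_key zs (s + y)]
    simp [pvOdds]
    ring

lemma pvFilterMap_odds : ∀ (xs : List Int),
    List.filterMap (fun (k : Nat) => xs[(1 + 2 * (k : Int)).toNat]?) (List.range (xs.length / 2))
      = pvOdds xs
  | [] => by simp [pvOdds]
  | [x] => by simp [pvOdds]
  | x :: y :: zs => by
    have ih := pvFilterMap_odds zs
    have hl : (x :: y :: zs).length / 2 = zs.length / 2 + 1 := by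
      simp; omega
    rw [hl, List.range_succ_eq_map, List.filterMap_cons, List.filterMap_map]
    have h0 : ((x :: y :: zs))[(1 + 2 * ((0 : Nat) : Int)).toNat]? = some y := by
      norm_num
    rw [h0]
    have hrest : List.filterMap
        ((fun (k : Nat) => (x :: y :: zs)[(1 + 2 * (k : Int)).toNat]?) ∘ Nat.succ)
        (List.range (zs.length / 2))
        = List.filterMap (fun (k : Nat) => zs[(1 + 2 * (k : Int)).toNat]?)
            (List.range (zs.length / 2)) := by
      apply List.filterMap_congr
      intro k _
      have h1 : (1 + 2 * ((Nat.succ k : Nat) : Int)).toNat = (1 + 2 * (k : Int)).toNat + 2 := by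
        push_cast; omega
      simp only [Function.comp_apply, h1]
      rfl
    rw [hrest, ih]
    rfl

lemma pvSlice_odds (xs : List Int) :
    PySem.List.slice? xs (some 1) none 2 = some (pvOdds xs) := by
  match xs with
  | [] => rfl
  | x :: rest =>
    rw [PySem.List.slice?, PySem.List.sliceIndices]
    norm_num
    have hc : (if 0 < rest.length then (((rest.length : Int) + 2 - 1) / 2).toNat else 0)
        = (x :: rest).length / 2 := by
      by_cases h : 0 < rest.length
      · rw [if_pos h]; simp; omega
      · rw [if_neg h]; simp; omega
    rw [hc]
    exact pvFilterMap_odds (x :: rest)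

theorem pv_main (list : List Int) : sum_not_even list = sum_not_even_alt list := by
  unfold sum_not_even sum_not_even_alt
  rw [pvSlice_odds]
  rw [PySem.List.pyRange_one]
  have hn : (((list.length : Int)) - 0).toNat = list.length := by omega
  rw [hn, List.foldl_map]
  rw [List.foldl_ext _ (fun s (k : Nat) => if (k % 2 : Nat) ≠ 0 then s + list.getD k 0 else s)
    _ (fun a b _ => by
      have hmod : ((b : Int) % 2 = 1) ↔ ((b % 2 : Nat) = 1) := by omega
      simp [hmod])]
  rw [pvOdds_key]
  simp

-- ===== VERDICT (by name: the statement is the Claim_ definition above) =====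
theorem sum_not_even_spec : Claim_equal_sum_not_even := by
  intro list _
  unfold Spec_sum_not_even
  exact pv_main list
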